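-- pv_equiv track=rewrite | github.com/debdattasarkar/DSA | 2. GFG/4. Top 50 DP Problems/27. (M) Player with max score/py_sol.py | is1winner
-- ===== SOURCE A (Python) =====
-- def is1winner (N, arr):
--     """
--     Returns True if Player 1 can ensure a score >= Player 2 (tie counts as a win).
--     DP state: F(i,j) = best score difference current player can achieve on arr[i..j].
--     Transition: F(i,j) = max(arr[i] - F(i+1,j), arr[j] - F(i,j-1)).
--     Time: O(N^2), Space: O(N).
--     """
--     # 1-D DP along diagonals:
--     # dp[j] holds F(i, j) for current i (looping i from N-2 downto 0, j from i+1..N-1)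
--     dp = arr[:]  # Base: F(j,j) = arr[j]
--     for i in range(N - 2, -1, -1):
--         for j in range(i + 1, N):
--             take_left  = arr[i] - dp[j]       # arr[i] - F(i+1, j)
--             take_right = arr[j] - dp[j - 1]   # arr[j] - F(i,   j-1)
--             dp[j] = max(take_left, take_right)
--     # Tie counts as a win for Player 1 on this platform
--     return dp[N - 1] >= 0
-- ===== SOURCE B (Python) =====
-- def is1winner(N, arr):
--     # Top-down memoized recursion over the interval [i, j]:
--     # F(i, j) = best score difference the player to move achieves on arr[i..j].
--     memo = {}
--     def F(i, j):
--         if (i, j) in memo: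
--             return memo[(i, j)]
--         if i == j:
--             v = arr[i]
--         else:
--             v = max(arr[i] - F(i + 1, j), arr[j] - F(i, j - 1))
--         memo[(i, j)] = v
--         return v
--     return F(0, N - 1) >= 0
-- ===== Notes on version B (the rewrite author's own statement) =====
-- stated objective: alternative
-- what changed: Replaces A's bottom-up reversed-index sweep over a rolling 1-D dp array with top-down memoized recursion F(i,j) over the interval, demand-driven from F(0,N-1).
-- outside the precondition, e.g. on is1winner(0, [5]): A returns True, B raises IndexError; on is1winner(-1, [3, -7]): A returns True, B raises IndexError
import Mathlib
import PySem

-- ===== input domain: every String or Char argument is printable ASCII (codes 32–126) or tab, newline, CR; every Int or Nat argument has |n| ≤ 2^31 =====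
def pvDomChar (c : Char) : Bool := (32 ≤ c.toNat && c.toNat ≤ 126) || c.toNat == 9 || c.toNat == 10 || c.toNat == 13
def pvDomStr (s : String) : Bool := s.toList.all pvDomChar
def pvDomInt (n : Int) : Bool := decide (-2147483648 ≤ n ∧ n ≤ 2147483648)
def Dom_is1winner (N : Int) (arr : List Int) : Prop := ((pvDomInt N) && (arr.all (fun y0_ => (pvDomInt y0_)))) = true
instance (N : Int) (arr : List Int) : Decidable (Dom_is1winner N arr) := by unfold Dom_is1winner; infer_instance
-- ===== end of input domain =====

-- B replaces A's bottom-up reversed-index sweep over a rolling 1-D dp array with top-down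
-- memoized recursion F(i,j) demand-driven from F(0,N-1): an alternative decomposition, same O(N^2) cost.

-- ===== PORT A =====
-- pyGetD/pySetD are exact here: under Pre_is1winner every index used is in range (0 ≤ i < j < N ≤ len arr).
def is1winner (N : Int) (arr : List Int) : Bool :=
  let dp := PySem.List.slice arr none none      -- dp = arr[:]
  let dp := (PySem.List.pyRange (N - 2) (-1) (-1)).foldl (fun dp i =>
      (PySem.List.pyRange (i + 1) N 1).foldl (fun dp j =>
        let takeLeft := PySem.List.pyGetD arr i 0 - PySem.List.pyGetD dp j 0
        let takeRight := PySem.List.pyGetD arr j 0 - PySem.List.pyGetD dp (j - 1) 0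
        PySem.List.pySetD dp j (max takeLeft takeRight)) dp) dp
  decide (0 ≤ PySem.List.pyGetD dp (N - 1) 0)

-- ===== PORT B =====
-- Fuel only makes the recursion total: under Pre_is1winner the recursion depth is at most j - i,
-- so fuel N.toNat never runs out (at fuel 0, where Python would have raised, we return 0).
-- pyGetD is exact here: under Pre_is1winner every index reached is in range.
def fMemo (arr : List Int) :
    Nat → Int → Int → PySem.Dict (Int × Int) Int → Int × PySem.Dict (Int × Int) Int
  | 0, _, _, memo => (0, memo)
  | Nat.succ fuel, i, j, memo =>
    match memo.get? (i, j) with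
    | some v => (v, memo)
    | none =>
      if i == j then
        let v := PySem.List.pyGetD arr i 0
        (v, memo.insert (i, j) v)
      else
        let r1 := fMemo arr fuel (i + 1) j memo
        let r2 := fMemo arr fuel i (j - 1) r1.2
        let v := max (PySem.List.pyGetD arr i 0 - r1.1) (PySem.List.pyGetD arr j 0 - r2.1)
        (v, r2.2.insert (i, j) v)

def is1winner_alt (N : Int) (arr : List Int) : Bool :=
  decide (0 ≤ (fMemo arr N.toNat 0 (N - 1) PySem.Dict.empty).1)

-- ===== PRECONDITION & SPEC =====
-- Pre_ requires 1 ≤ N ≤ len(arr): outside it A raises IndexError (N > len(arr), or N ≤ 0 with empty arr),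
-- or, for N ≤ 0 on a nonempty arr, A returns arr[N-1] >= 0 by accidental negative-index wraparound,
-- where B's recursion never reaches a base case and raises (IndexError/RecursionError).
def Pre_is1winner (N : Int) (arr : List Int) : Prop := 1 ≤ N ∧ N ≤ arr.length
instance (N : Int) (arr : List Int) : Decidable (Pre_is1winner N arr) := by unfold Pre_is1winner; infer_instance
def pvWitness_is1winner : Int × List Int := (3, [4, -2, 5])

def Spec_is1winner (N : Int) (arr : List Int) (out : Bool) : Prop := out = is1winner_alt N arr
instance (N : Int) (arr : List Int) (out : Bool) : Decidable (Spec_is1winner N arr out) := by unfold Spec_is1winner; infer_instance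

-- ===== CLAIM (what is proved, stated in full; the proofs are below) =====
def Claim_equal_is1winner : Prop := ∀ (N : Int) (arr : List Int), Dom_is1winner N arr → Pre_is1winner N arr → Spec_is1winner N arr (is1winner N arr)

-- ===== LEMMAS AND PROOFS =====

def gval (arr : List Int) (i j : Nat) : Int :=
  if j ≤ i then arr.getD i 0
  else max (arr.getD i 0 - gval arr (i + 1) j) (arr.getD j 0 - gval arr i (j - 1))
termination_by j - i
decreasing_by all_goals omega

theorem getD_set_ite (dp : List Int) (j : Nat) (v : Int) (k : Nat) (h : j < dp.length) :
    (dp.set j v).getD k 0 = if k = j then v else dp.getD k 0 := by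
  rw [List.getD_eq_getElem?_getD, List.getD_eq_getElem?_getD, List.getElem?_set]
  by_cases hk : k = j
  · subst hk; simp [h]
  · have : ¬ (j = k) := fun e => hk e.symm
    simp [this, hk]

theorem gval_lt (arr : List Int) (i j : Nat) (h : i < j) :
    gval arr i j = max (arr.getD i 0 - gval arr (i + 1) j) (arr.getD j 0 - gval arr i (j - 1)) := by
  rw [gval, if_neg (by omega)]

def innerStepA (arr : List Int) (i : Int) (dp : List Int) (j : Int) : List Int :=
  let takeLeft := PySem.List.pyGetD arr i 0 - PySem.List.pyGetD dp j 0
  let takeRight := PySem.List.pyGetD arr j 0 - PySem.List.pyGetD dp (j - 1) 0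
  PySem.List.pySetD dp j (max takeLeft takeRight)

theorem innerA (arr : List Int) (n i : Nat) (hn : n ≤ arr.length) :
    ∀ (fuel j : Nat) (dp : List Int), n - j = fuel → i + 1 ≤ j → j ≤ n → dp.length = arr.length →
    (∀ k : Nat, k < n → dp.getD k 0 = gval arr (min (if k < j then i else i + 1) k) k) →
    ((PySem.List.pyRange (j : Int) (n : Int) 1).foldl (innerStepA arr (i : Int)) dp).length = arr.length ∧
    (∀ k : Nat, k < n →
      ((PySem.List.pyRange (j : Int) (n : Int) 1).foldl (innerStepA arr (i : Int)) dp).getD k 0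
        = gval arr (min i k) k) := by
  intro fuel
  induction fuel with
  | zero =>
    intro j dp hfuel hij hjn hlen hinv
    have hnj : n ≤ j := by omega
    rw [PySem.List.pyRange_one_eq_nil (by exact_mod_cast hnj)]
    refine ⟨hlen, fun k hk => ?_⟩
    have := hinv k hk
    have hkj : k < j := by omega
    simpa [hkj] using this
  | succ fuel ih =>
    intro j dp hfuel hij hjn hlen hinv
    have hjn' : j < n := by omega
    rw [PySem.List.pyRange_one_cons (by exact_mod_cast hjn')]
    rw [List.foldl_cons]
    -- evaluate the step at index j
    have hjlen : j < dp.length := by omega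
    have hcast : ((j : Int) - 1) = (((j - 1 : Nat)) : Int) := by
      have : 1 ≤ j := by omega
      push_cast [Nat.cast_sub this]; ring
    have hstep : innerStepA arr (i : Int) dp (j : Int)
        = dp.set j (max (arr.getD i 0 - gval arr (i + 1) j) (arr.getD (j : Nat) 0 - gval arr i (j - 1))) := by
      unfold innerStepA
      rw [hcast]
      simp only [PySem.List.pyGetD_natCast, PySem.List.pySetD_natCast]
      congr 1
      · -- dp lookups
        have h1 : dp.getD j 0 = gval arr (min (i + 1) j) j := by
          have := hinv j hjn'
          simpa [lt_irrefl] using this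
        have h2 : dp.getD (j - 1) 0 = gval arr (min i (j - 1)) (j - 1) := by
          have := hinv (j - 1) (by omega)
          have : dp.getD (j-1) 0 = gval arr (min (if j - 1 < j then i else i + 1) (j-1)) (j-1) := this
          simpa [show j - 1 < j by omega] using this
        rw [h1, h2, Nat.min_eq_left (by omega), Nat.min_eq_left (by omega)]
    rw [hstep]
    have hgv : gval arr i j = max (arr.getD i 0 - gval arr (i + 1) j) (arr.getD j 0 - gval arr i (j - 1)) := gval_lt arr i j (by omega)
    -- apply ih at j+1
    have hpush : ((j : Int) + 1) = (((j + 1 : Nat)) : Int) := by push_cast; ring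
    rw [hpush]
    apply ih (j + 1) _ (by omega) (by omega) (by omega) (by simp [hlen])
    intro k hk
    rw [getD_set_ite _ _ _ _ hjlen]
    by_cases hkj : k = j
    · subst hkj
      rw [if_pos (show k < k + 1 by omega), Nat.min_eq_left (show i ≤ k by omega), ← hgv]
      simp
    · rw [if_neg hkj]
      have := hinv k hk
      by_cases hlt : k < j
      · simp only [if_pos hlt] at this
        simp only [show k < j + 1 by omega, if_pos]
        exact this
      · simp only [if_neg hlt] at this
        rw [if_neg (show ¬ (k < j + 1) by omega)]
        simpa using this

theorem gval_diag (arr : List Int) (k : Nat) : gval arr k k = arr.getD k 0 := by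
  rw [gval]; simp

def outerStepA (arr : List Int) (N : Int) (dp : List Int) (ii : Int) : List Int :=
  (PySem.List.pyRange (ii + 1) N 1).foldl (innerStepA arr ii) dp

theorem outerA (arr : List Int) (n : Nat) (hn : n ≤ arr.length) :
    ∀ (i : Nat) (dp : List Int), i + 2 ≤ n → dp.length = arr.length →
    (∀ k : Nat, k < n → dp.getD k 0 = gval arr (min (i + 1) k) k) →
    ((PySem.List.pyRange (i : Int) (-1) (-1)).foldl (outerStepA arr (n : Int)) dp).length = arr.length ∧
    (∀ k : Nat, k < n →
      ((PySem.List.pyRange (i : Int) (-1) (-1)).foldl (outerStepA arr (n : Int)) dp).getD k 0 = gval arr 0 k) := by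
  intro i
  induction i with
  | zero =>
    intro dp hi hlen hinv
    rw [PySem.List.pyRange_neg_one_cons (by norm_num), PySem.List.pyRange_neg_one_eq_nil (by norm_num)]
    rw [List.foldl_cons, List.foldl_nil]
    unfold outerStepA
    have h01 : (((0 : Nat) : Int) + 1) = ((1 : Nat) : Int) := by norm_num
    rw [h01]
    have := innerA arr n 0 hn (n - 1) 1 dp (by omega) (by omega) (by omega) hlen ?_
    · refine ⟨this.1, fun k hk => ?_⟩
      have := this.2 k hk
      simpa [Nat.min_eq_left (Nat.zero_le k)] using this
    · intro k hk
      have := hinv k hk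
      by_cases hk1 : k < 1
      · have hk0 : k = 0 := by omega
        subst hk0
        simpa using this
      · simpa [hk1, if_neg] using this
  | succ i ih =>
    intro dp hi hlen hinv
    have : ((i + 1 : Nat) : Int) = (i : Int) + 1 := by push_cast; ring
    rw [this, PySem.List.pyRange_neg_one_cons (by omega), List.foldl_cons]
    have hback : ((i : Int) + 1 - 1) = (i : Int) := by ring
    rw [hback]
    -- evaluate the head step: outerStepA at ii = i+1
    have hcast2 : ((i : Int) + 1 + 1) = ((i + 2 : Nat) : Int) := by push_cast; ring
    have hstep : outerStepA arr (n : Int) dp ((i : Int) + 1)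
        = (PySem.List.pyRange ((i + 2 : Nat) : Int) (n : Int) 1).foldl (innerStepA arr ((i + 1 : Nat) : Int)) dp := by
      unfold outerStepA
      rw [hcast2, this]
    rw [hstep]
    have hin := innerA arr n (i + 1) hn (n - (i + 2)) (i + 2) dp (by omega) (by omega) (by omega) hlen ?_
    · exact ih _ (by omega) hin.1 (fun k hk => by
        have := hin.2 k hk
        exact this)
    · intro k hk
      have := hinv k hk
      by_cases hklt : k < i + 2
      · rw [if_pos hklt]
        rw [Nat.min_eq_right (by omega)] at this
        rw [Nat.min_eq_right (by omega)]
        exact this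
      · rw [if_neg hklt]
        rw [Nat.min_eq_left (by omega)] at this
        rw [Nat.min_eq_left (by omega)]
        exact this

theorem A_eval (N : Int) (arr : List Int) (h1 : 1 ≤ N) (h2 : N ≤ arr.length) :
    is1winner N arr = decide (0 ≤ gval arr 0 (N.toNat - 1)) := by
  obtain ⟨n, rfl⟩ := Int.eq_ofNat_of_zero_le (by omega : (0 : Int) ≤ N)
  rw [Int.toNat_natCast]
  have hnlen : n ≤ arr.length := by exact_mod_cast h2
  show decide (0 ≤ PySem.List.pyGetD
      ((PySem.List.pyRange ((n : Int) - 2) (-1) (-1)).foldl (outerStepA arr (n : Int)) (PySem.List.slice arr none none)) ((n : Int) - 1) 0)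
    = decide (0 ≤ gval arr 0 (n - 1))
  rw [PySem.List.slice_none_none]
  rcases Nat.lt_or_ge n 2 with hsmall | hbig
  · have hn1 : n = 1 := by omega
    subst hn1
    rw [PySem.List.pyRange_neg_one_eq_nil (by norm_num), List.foldl_nil]
    norm_num [gval_diag, PySem.List.pyGetD_zero]
  · have hc : ((n : Int) - 2) = ((n - 2 : Nat) : Int) := by push_cast [Nat.cast_sub hbig]; ring
    rw [hc]
    have hout := outerA arr n hnlen (n - 2) arr (by omega) rfl ?_
    · have hres := hout.2 (n - 1) (by omega)
      have hc1 : ((n : Int) - 1) = ((n - 1 : Nat) : Int) := by push_cast [Nat.cast_sub (by omega : 1 ≤ n)]; ring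
      rw [hc1, PySem.List.pyGetD_natCast, hres]
    · intro k hk
      rw [Nat.min_eq_right (by omega), gval_diag]

-- B side: the memo only ever holds correct interval values
def GoodMemo (arr : List Int) (memo : PySem.Dict (Int × Int) Int) : Prop :=
  ∀ p v, memo.get? p = some v →
    ∃ a b : Nat, p = ((a : Int), (b : Int)) ∧ a ≤ b ∧ b < arr.length ∧ v = gval arr a b

theorem goodMemo_insert (arr : List Int) (memo : PySem.Dict (Int × Int) Int)
    (a b : Nat) (hab : a ≤ b) (hb : b < arr.length) (hg : GoodMemo arr memo) :
    GoodMemo arr (memo.insert ((a : Int), (b : Int)) (gval arr a b)) := by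
  intro p v hv
  rw [PySem.Dict.get?_insert] at hv
  by_cases hp : p = ((a : Int), (b : Int))
  · rw [if_pos hp] at hv
    exact ⟨a, b, hp, hab, hb, (Option.some_injective _ hv).symm⟩
  · rw [if_neg hp] at hv
    exact hg p v hv

theorem fMemo_correct (arr : List Int) :
    ∀ (fuel a b : Nat) (memo : PySem.Dict (Int × Int) Int),
      a ≤ b → b < arr.length → b - a < fuel → GoodMemo arr memo →
      (fMemo arr fuel (a : Int) (b : Int) memo).1 = gval arr a b ∧
      GoodMemo arr (fMemo arr fuel (a : Int) (b : Int) memo).2 := by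
  intro fuel
  induction fuel with
  | zero => intro a b memo _ _ hf _; omega
  | succ fuel ih =>
    intro a b memo hab hb hf hg
    rw [fMemo]
    cases hget : memo.get? ((a : Int), (b : Int)) with
    | some v =>
      obtain ⟨a', b', hp, _, _, hv⟩ := hg _ v hget
      injection hp with hpa hpb
      have ha' : a' = a := by exact_mod_cast hpa.symm
      have hb' : b' = b := by exact_mod_cast hpb.symm
      subst ha'; subst hb'
      exact ⟨hv.symm ▸ rfl, hg⟩
    | none =>
      by_cases heq : a = b
      · subst heq
        simp only [beq_self_eq_true, if_true]
        constructor
        · rw [PySem.List.pyGetD_natCast, gval_diag]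
        · have := goodMemo_insert arr memo a a (le_refl a) hb hg
          simpa [PySem.List.pyGetD_natCast, gval_diag] using this
      · have hlt : a < b := by omega
        have hne : ¬ (((a : Int)) == ((b : Int))) = true := by
          simp only [beq_iff_eq, Int.natCast_inj]; exact heq
        rw [if_neg hne]
        have hc1 : ((a : Int) + 1) = ((a + 1 : Nat) : Int) := by push_cast; ring
        have hc2 : ((b : Int) - 1) = ((b - 1 : Nat) : Int) := by
          push_cast [Nat.cast_sub (by omega : 1 ≤ b)]; ring
        rw [hc1, hc2]
        obtain ⟨h1v, h1g⟩ := ih (a + 1) b memo (by omega) hb (by omega) hg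
        obtain ⟨h2v, h2g⟩ := ih a (b - 1) _ (by omega) (by omega) (by omega) h1g
        simp only [h1v, h2v, PySem.List.pyGetD_natCast]
        constructor
        · rw [gval_lt arr a b hlt]
        · have : max (arr.getD a 0 - gval arr (a + 1) b) (arr.getD b 0 - gval arr a (b - 1))
              = gval arr a b := (gval_lt arr a b hlt).symm
          rw [this]
          exact goodMemo_insert arr _ a b hab hb h2g

theorem goodMemo_empty (arr : List Int) : GoodMemo arr PySem.Dict.empty := by
  intro p v hv
  rw [PySem.Dict.get?_empty] at hv
  exact absurd hv (by simp)

theorem B_eval (N : Int) (arr : List Int) (h1 : 1 ≤ N) (h2 : N ≤ arr.length) :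
    is1winner_alt N arr = decide (0 ≤ gval arr 0 (N.toNat - 1)) := by
  obtain ⟨n, rfl⟩ := Int.eq_ofNat_of_zero_le (by omega : (0 : Int) ≤ N)
  rw [Int.toNat_natCast]
  have hn1 : 1 ≤ n := by exact_mod_cast h1
  have hnlen : n ≤ arr.length := by exact_mod_cast h2
  unfold is1winner_alt
  rw [Int.toNat_natCast]
  have hc0 : (0 : Int) = ((0 : Nat) : Int) := by norm_num
  have hc1 : ((n : Int) - 1) = ((n - 1 : Nat) : Int) := by push_cast [Nat.cast_sub hn1]; ring
  rw [hc0, hc1]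
  rw [(fMemo_correct arr n 0 (n - 1) PySem.Dict.empty (by omega) (by omega) (by omega) (goodMemo_empty arr)).1]

-- ===== VERDICT (by name: the statement is the Claim_ definition above) =====
theorem is1winner_spec : Claim_equal_is1winner := by
  intro N arr _ hpre
  obtain ⟨h1, h2⟩ := hpre
  unfold Spec_is1winner
  rw [A_eval N arr h1 h2, B_eval N arr h1 h2]
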